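-- pv_equiv track=rewrite | github.com/minaxixi/ai-couplet | model.py | _get_repeated_chars
-- ===== SOURCE A (Python) =====
-- def _get_repeated_chars(inputs):
--     """ get repeated characters by index in the input """
--
--     first_seen_idx = {}
--     repeated_chars = {}
--     for i, char_idx in enumerate(inputs):
--         if char_idx not in first_seen_idx.keys():
--             first_seen_idx[char_idx] = i
--         else:
--             repeated_chars[i] = first_seen_idx[char_idx]
--
--     return repeated_chars
-- ===== SOURCE B (Python) =====
-- def _get_repeated_chars(inputs):
--     """ get repeated characters by index in the input """
--     groups = {}
--     for i, x in enumerate(inputs):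
--         groups.setdefault(x, []).append(i)
--     pairs = []
--     for idxs in groups.values():
--         first = idxs[0]
--         for j in idxs[1:]:
--             pairs.append((j, first))
--     pairs.sort(key=lambda p: p[0])
--     return dict(pairs)
-- ===== Notes on version B (the rewrite author's own statement) =====
-- stated objective: alternative
-- what changed: Replaces the incremental first-seen membership test with a two-phase group-by: one pass groups all indices by value into a dict of lists, a second pass emits (later index -> first index) pairs per group, then sorts the pairs by index to restore the original emission order.
import Mathlib
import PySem

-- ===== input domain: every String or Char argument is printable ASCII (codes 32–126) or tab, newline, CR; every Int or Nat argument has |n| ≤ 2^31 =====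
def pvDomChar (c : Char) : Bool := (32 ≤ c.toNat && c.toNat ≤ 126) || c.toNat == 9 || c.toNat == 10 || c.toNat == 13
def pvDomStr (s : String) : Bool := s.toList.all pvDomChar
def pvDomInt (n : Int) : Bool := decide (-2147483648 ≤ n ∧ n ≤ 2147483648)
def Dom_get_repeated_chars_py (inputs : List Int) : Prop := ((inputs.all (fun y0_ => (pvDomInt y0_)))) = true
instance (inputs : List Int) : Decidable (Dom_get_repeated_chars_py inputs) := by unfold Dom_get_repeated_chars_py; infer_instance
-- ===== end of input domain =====

-- B replaces A's incremental first-seen dict with a two-phase group-by (index lists per value,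
-- then emit later-index -> first-index per group and sort by index); alternative, not faster.


-- ===== PORT A =====
-- state = (first_seen_idx, repeated_chars); rep[i] = fs[char_idx] is ported as getD (the key
-- is present on that branch, so no KeyError can occur)
def get_repeated_chars_py (inputs : List Int) : List (Int × Int) :=
  let final := (PySem.List.enumerate inputs 0).foldl
    (fun (st : PySem.Dict Int Int × PySem.Dict Int Int) p =>
      if !(st.1.contains p.2) then
        (st.1.insert p.2 p.1, st.2)
      else
        (st.1, st.2.insert p.1 (st.1.getD p.2 0)))
    (PySem.Dict.empty, PySem.Dict.empty)
  final.2.items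

-- ===== PORT B =====
-- phase 1: groups.setdefault(x, []).append(i)  =  modify x [] (· ++ [i]);
-- phase 2: idxs[0] is ported as headD 0 (every value list of groups is nonempty), idxs[1:] as slice;
-- then pairs.sort(key=fst) and dict(pairs)
def get_repeated_chars_py_alt (inputs : List Int) : List (Int × Int) :=
  let groups := (PySem.List.enumerate inputs 0).foldl
    (fun (g : PySem.Dict Int (List Int)) p => g.modify p.2 [] (· ++ [p.1])) PySem.Dict.empty
  let pairs := groups.values.foldl
    (fun (acc : List (Int × Int)) idxs =>
      acc ++ (PySem.List.slice idxs (some 1) none).map (fun j => (j, idxs.headD 0))) []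
  (PySem.Dict.ofList (PySem.List.sorted pairs (fun p => p.1))).items

-- ===== PRECONDITION & SPEC =====
def Spec_get_repeated_chars_py (inputs : List Int) (out : List (Int × Int)) : Prop := out = get_repeated_chars_py_alt inputs
instance (inputs : List Int) (out : List (Int × Int)) : Decidable (Spec_get_repeated_chars_py inputs out) := by unfold Spec_get_repeated_chars_py; infer_instance

-- ===== CLAIM (what is proved, stated in full; the proofs are below) =====
def Claim_equal_get_repeated_chars_py : Prop := ∀ (inputs : List Int), Dom_get_repeated_chars_py inputs → Spec_get_repeated_chars_py inputs (get_repeated_chars_py inputs)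

-- ===== LEMMAS AND PROOFS =====

-- what A's loop emits: scanning suffix s after already-scanned prefix pre
def pvEmit (pre s : List Int) : List (Int × Int) :=
  match s with
  | [] => []
  | x :: t =>
    (if x ∈ pre then [((pre.length : Int), (((PySem.List.index? pre x).getD 0 : Nat) : Int))] else [])
      ++ pvEmit (pre ++ [x]) t

-- the index list of value v in inputs (what B's groups dict stores at key v)
def pvPos (inputs : List Int) (v : Int) : List Int :=
  ((PySem.List.enumerate inputs 0).filter (fun p => p.2 == v)).map (fun p => p.1)

-- what B emits for one group
def pvEmitG (idxs : List Int) : List (Int × Int) := idxs.tail.map (fun j => (j, idxs.headD 0))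

-- B's unsorted pair list, closed form
def pvPairs (inputs : List Int) : List (Int × Int) :=
  (PySem.Set.ofList inputs).flatMap (fun v => pvEmitG (pvPos inputs v))

theorem pvA_fold (s : List Int) : ∀ (pre : List Int) (fs rep : PySem.Dict Int Int),
    (∀ x, fs.get? x = (PySem.List.index? pre x).map (fun n => (n : Int))) →
    (∀ k ∈ rep.keys, k < (pre.length : Int)) →
    (((PySem.List.enumerate s (pre.length)).foldl
      (fun (st : PySem.Dict Int Int × PySem.Dict Int Int) p =>
        if !(st.1.contains p.2) then
          (st.1.insert p.2 p.1, st.2)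
        else
          (st.1, st.2.insert p.1 (st.1.getD p.2 0)))
      (fs, rep)).2).items = rep.items ++ pvEmit pre s := by
  induction s with
  | nil => intro pre fs rep hfs hrep; simp [pvEmit]
  | cons x t ih =>
    intro pre fs rep hfs hrep
    rw [PySem.List.enumerate_cons, List.foldl_cons]
    by_cases hx : x ∈ pre
    · rcases Option.isSome_iff_exists.1 ((PySem.List.index?_isSome_iff _ _).2 hx)
        with ⟨n, hn⟩
      have hget : fs.get? x = some (n : Int) := by rw [hfs x, hn]; rfl
      have hcont : fs.contains x = true := by
        rw [PySem.Dict.contains_eq_isSome_get?, hget]; rfl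
      have hne : rep.contains ((pre.length : Int)) = false := by
        by_contra h
        have h' : rep.contains ((pre.length : Int)) = true := by simpa using h
        have := hrep _ ((PySem.Dict.contains_iff_mem_keys _ _).1 h')
        omega
      simp only [hcont, Bool.not_true, Bool.false_eq_true, if_false]
      have hstep : ((pre.length : Int) + 1) = (((pre ++ [x]).length : Nat) : Int) := by
        simp
      rw [hstep, ih (pre ++ [x])]
      · rw [PySem.Dict.items_insert_of_not_contains _ _ hne]
        have hval : fs.getD x 0 = (n : Int) := PySem.Dict.getD_of_get?_eq_some _ _ hget
        rw [pvEmit, if_pos hx, hn, hval]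
        simp [List.append_assoc]
      · intro y
        rw [hfs y]
        by_cases hy : y ∈ pre
        · rw [PySem.List.index?_append_of_mem _ hy]
        · by_cases hyx : y = x
          · exact absurd (hyx ▸ hx) hy
          · rw [(PySem.List.index?_eq_none_iff _ _).2 hy,
              (PySem.List.index?_eq_none_iff _ _).2 (by simp [hy, hyx])]
      · intro k hk
        rcases (PySem.Dict.mem_keys_insert _ _ _ _).1 hk with h | h
        · subst h; simp
        · have := hrep k h; simp; omega
    · have hget : fs.get? x = none := by
        rw [hfs x, (PySem.List.index?_eq_none_iff _ _).2 hx]; rfl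
      have hcont : fs.contains x = false := by
        rw [PySem.Dict.contains_eq_isSome_get?, hget]; rfl
      simp only [hcont, Bool.not_false, if_true]
      have hstep : ((pre.length : Int) + 1) = (((pre ++ [x]).length : Nat) : Int) := by
        simp
      rw [hstep, ih (pre ++ [x])]
      · simp [pvEmit, hx]
      · intro y
        by_cases hyx : y = x
        · subst hyx
          rw [PySem.Dict.get?_insert_self, PySem.List.index?_append_singleton_self _ _ hx]
          rfl
        · rw [PySem.Dict.get?_insert_of_ne _ _ hyx, hfs y]
          by_cases hy : y ∈ pre
          · rw [PySem.List.index?_append_of_mem _ hy]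
          · rw [(PySem.List.index?_eq_none_iff _ _).2 hy,
              (PySem.List.index?_eq_none_iff _ _).2 (by simp [hy, hyx])]
      · intro k hk; have := hrep k hk; simp; omega

theorem pvB_pairs (inputs : List Int) :
    ((((PySem.List.enumerate inputs 0).foldl
      (fun (g : PySem.Dict Int (List Int)) p => g.modify p.2 [] (· ++ [p.1]))
      PySem.Dict.empty).values).foldl
      (fun (acc : List (Int × Int)) idxs =>
        acc ++ (PySem.List.slice idxs (some 1) none).map (fun j => (j, idxs.headD 0))) [])
    = pvPairs inputs := by
  have hkeys : ∀ (l : List (Int × Int)),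
      (l.foldl (fun (g : PySem.Dict Int (List Int)) p => g.modify p.2 [] (· ++ [p.1]))
        PySem.Dict.empty).keys = PySem.Set.ofList (l.map (fun p => p.2)) := by
    intro l
    rw [PySem.Dict.keys_foldl_modify_key l (fun p => p.2) [] (fun _ p => (· ++ [p.1]))]
    simp [PySem.Set.update_nil_left]
  have hnodup : ∀ (l : List (Int × Int)),
      (l.foldl (fun (g : PySem.Dict Int (List Int)) p => g.modify p.2 [] (· ++ [p.1]))
        PySem.Dict.empty).keys.Nodup := by
    intro l
    exact PySem.Dict.nodup_keys_foldl_modify_key l (fun p => p.2) [] (fun _ p => (· ++ [p.1]))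
      _ (by simp)
  have hgetD : ∀ (l : List (Int × Int)) c,
      (l.foldl (fun (g : PySem.Dict Int (List Int)) p => g.modify p.2 [] (· ++ [p.1]))
        PySem.Dict.empty).getD c []
      = (l.filter (fun p => p.2 == c)).map (fun p => p.1) := by
    intro l c
    have hswap : l.foldl (fun (g : PySem.Dict Int (List Int)) p => g.modify p.2 [] (· ++ [p.1]))
        PySem.Dict.empty
        = (l.map (fun p => (p.2, p.1))).foldl
          (fun (g : PySem.Dict Int (List Int)) q => g.modify q.1 [] (· ++ [q.2]))
          PySem.Dict.empty := by
      rw [List.foldl_map]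
    rw [hswap, PySem.Dict.getD_foldl_modify_append]
    simp [List.filter_map, Function.comp_def]
  rw [PySem.List.foldl_append_eq_flatMap, List.nil_append,
    PySem.Dict.values_eq_map_keys _ (hnodup _) [], hkeys, List.flatMap_map,
    PySem.List.map_snd_enumerate]
  unfold pvPairs
  refine List.flatMap_congr ?_
  intro v _
  simp [Function.comp_def, hgetD, pvEmitG, pvPos, PySem.List.slice_from_one]

theorem pvPos_head? (l : List Int) (x : Int) : ∀ s : Int,
    (((PySem.List.enumerate l s).filter (fun p => p.2 == x)).map (fun p => p.1)).head?
      = (PySem.List.index? l x).map (fun n => s + (n : Int)) := by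
  induction l with
  | nil => intro s; simp [PySem.List.enumerate_nil]
  | cons y t ih =>
    intro s
    rw [PySem.List.enumerate_cons, List.filter_cons]
    by_cases hyx : y = x
    · subst hyx
      rw [PySem.List.index?_cons_self]
      simp
    · have hbe : ((s, y).2 == x) = false := by simp [hyx]
      rw [hbe]
      simp only [Bool.false_eq_true, if_false, ih (s + 1),
        PySem.List.index?_cons_of_ne t hyx]
      cases h : PySem.List.index? t x with
      | none => simp
      | some n => simp; ring

theorem pvEmit_append (s t : List Int) : ∀ pre,
    pvEmit pre (s ++ t) = pvEmit pre s ++ pvEmit (pre ++ s) t := by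
  induction s with
  | nil => intro pre; simp [pvEmit]
  | cons x r ih =>
    intro pre
    simp only [List.cons_append, pvEmit, ih (pre ++ [x]), List.append_assoc,
      List.nil_append]

theorem pvPos_snoc (inputs : List Int) (x v : Int) :
    pvPos (inputs ++ [x]) v = pvPos inputs v ++ (if v = x then [(inputs.length : Int)] else []) := by
  unfold pvPos
  rw [PySem.List.enumerate_append, List.filter_append, List.map_append]
  congr 1
  by_cases hvx : v = x
  · subst hvx
    simp [PySem.List.enumerate_cons, PySem.List.enumerate_nil]
  · simp [PySem.List.enumerate_cons, PySem.List.enumerate_nil, Ne.symm hvx, hvx]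

theorem pvPos_nil_of_not_mem (inputs : List Int) (v : Int) (h : v ∉ inputs) :
    pvPos inputs v = [] := by
  unfold pvPos
  rw [List.map_eq_nil_iff, List.filter_eq_nil_iff]
  intro p hp hpv
  rcases (PySem.List.mem_enumerate_iff _ _ _).1 hp with ⟨k, hk, rfl⟩
  have : inputs[k] = v := by simpa using hpv
  exact h (this ▸ List.getElem_mem hk)

theorem pvPerm4 {α : Type} (a b c d : List α) :
    (a ++ ((b ++ d) ++ c)).Perm ((a ++ (b ++ c)) ++ d) := by
  rw [← Multiset.coe_eq_coe]
  simp
  exact List.Perm.append_left _ (List.Perm.append_left _ List.perm_append_comm)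

theorem pvEmitG_snoc (idxs : List Int) (a : Int) (h : idxs ≠ []) :
    pvEmitG (idxs ++ [a]) = pvEmitG idxs ++ [(a, idxs.headD 0)] := by
  cases idxs with
  | nil => exact absurd rfl h
  | cons y t => simp [pvEmitG]

theorem pvPos_of_mem (l : List Int) (x : Int) (hx : x ∈ l) :
    ∃ n : Nat, PySem.List.index? l x = some n ∧ pvPos l x ≠ [] ∧
      (pvPos l x).headD 0 = (n : Int) ∧ (((PySem.List.index? l x).getD 0 : Nat) : Int) = (n : Int) := by
  rcases Option.isSome_iff_exists.1 ((PySem.List.index?_isSome_iff _ _).2 hx) with ⟨n, hn⟩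
  have hh : (pvPos l x).head? = some ((0 : Int) + (n : Int)) := by
    have h0 := pvPos_head? l x 0
    rw [hn] at h0
    exact h0
  rw [zero_add] at hh
  refine ⟨n, hn, ?_, ?_, by rw [hn]; rfl⟩
  · intro hnil
    rw [hnil] at hh
    simp at hh
  · rw [List.headD_eq_head?_getD, hh]; rfl

theorem pvPairs_perm (inputs : List Int) : (pvPairs inputs).Perm (pvEmit [] inputs) := by
  induction inputs using List.reverseRecOn with
  | nil => simp [pvPairs, pvEmit]
  | append_singleton l x ih =>
    rw [pvEmit_append l [x] [], List.nil_append]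
    unfold pvPairs
    rw [PySem.Set.ofList_append_singleton]
    by_cases hx : x ∈ l
    · rw [PySem.Set.add_of_mem (by rw [PySem.Set.mem_ofList]; exact hx)]
      rcases List.append_of_mem ((PySem.Set.mem_ofList l x).2 hx) with ⟨S1, S2, hsplit⟩
      have hnd : (S1 ++ x :: S2).Nodup := hsplit ▸ PySem.Set.nodup_ofList l
      have hx1 : x ∉ S1 := fun h => (List.disjoint_of_nodup_append hnd) h (by simp)
      have hx2 : x ∉ S2 := by
        have := (List.nodup_append.1 hnd).2.1
        simp at this; exact this.1
      rcases pvPos_of_mem l x hx with ⟨n, hn, hne, hhead, hcast⟩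
      have hself : pvEmitG (pvPos (l ++ [x]) x)
          = pvEmitG (pvPos l x) ++ [((l.length : Int), (n : Int))] := by
        rw [pvPos_snoc, if_pos rfl, pvEmitG_snoc _ _ hne, hhead]
      have hother : ∀ v, v ≠ x → pvEmitG (pvPos (l ++ [x]) v) = pvEmitG (pvPos l v) := by
        intro v hv
        rw [pvPos_snoc, if_neg hv, List.append_nil]
      have hemit : pvEmit l [x] = [((l.length : Int), (n : Int))] := by
        rw [pvEmit, if_pos hx, pvEmit, hn]
        simp
      rw [hsplit, List.flatMap_append, List.flatMap_cons, hself, hemit,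
        List.flatMap_congr (l := S1) (g := fun v => pvEmitG (pvPos l v))
          (fun v hv => hother v (fun h => hx1 (h ▸ hv))),
        List.flatMap_congr (l := S2) (g := fun v => pvEmitG (pvPos l v))
          (fun v hv => hother v (fun h => hx2 (h ▸ hv)))]
      have hP : pvPairs l = S1.flatMap (fun v => pvEmitG (pvPos l v)) ++
          (pvEmitG (pvPos l x) ++ S2.flatMap (fun v => pvEmitG (pvPos l v))) := by
        rw [pvPairs, hsplit, List.flatMap_append, List.flatMap_cons]
      refine List.Perm.trans ?_ (List.Perm.append_right _ ih)
      rw [hP]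
      exact pvPerm4 _ _ _ _
    · rw [PySem.Set.add_of_not_mem (by rw [PySem.Set.mem_ofList]; exact hx)]
      have hemit : pvEmit l [x] = [] := by rw [pvEmit, if_neg hx, pvEmit]; simp
      have hselfe : pvEmitG (pvPos (l ++ [x]) x) = [] := by
        rw [pvPos_snoc, if_pos rfl, pvPos_nil_of_not_mem l x hx]
        rfl
      rw [List.flatMap_append, List.flatMap_singleton, hselfe, List.append_nil, hemit,
        List.append_nil,
        List.flatMap_congr (l := PySem.Set.ofList l) (g := fun v => pvEmitG (pvPos l v))
          (fun v hv => by
            rw [pvPos_snoc,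
              if_neg (fun h => hx (by rw [← h]; exact (PySem.Set.mem_ofList l v).1 hv)),
              List.append_nil])]
      exact ih

theorem pvEmit_bounds (s : List Int) : ∀ pre,
    (∀ p ∈ pvEmit pre s, (pre.length : Int) ≤ p.1) ∧
    (pvEmit pre s).Pairwise (fun a b => a.1 < b.1) := by
  induction s with
  | nil => intro pre; simp [pvEmit]
  | cons x t ih =>
    intro pre
    obtain ⟨ihb, ihp⟩ := ih (pre ++ [x])
    have hlen : ((pre ++ [x]).length : Int) = (pre.length : Int) + 1 := by simp
    rw [hlen] at ihb
    constructor
    · intro p hp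
      rw [pvEmit, List.mem_append] at hp
      rcases hp with hp | hp
      · split_ifs at hp with h
        · simp at hp; rw [hp]
        · simp at hp
      · have := ihb p hp; omega
    · rw [pvEmit, List.pairwise_append]
      refine ⟨by split_ifs <;> simp, ihp, ?_⟩
      intro a ha b hb
      have hb' := ihb b hb
      split_ifs at ha with h
      · simp at ha; rw [ha]; simp; omega
      · simp at ha

theorem pvDict_ofList_emit (inputs : List Int) :
    (PySem.Dict.ofList (pvEmit [] inputs)).items = pvEmit [] inputs := by
  have hnd : ((pvEmit [] inputs).map Prod.fst).Nodup :=
    (List.pairwise_map.2 ((pvEmit_bounds inputs []).2)).imp ne_of_lt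
  have hofl : PySem.Dict.ofList (pvEmit [] inputs)
      = (pvEmit [] inputs).foldl (fun (d : PySem.Dict Int Int) a => d.insert a.1 a.2)
        PySem.Dict.empty := rfl
  rw [hofl, PySem.Dict.items_foldl_insert_fresh _ Prod.fst Prod.snd _
    (fun a _ => by simp) hnd]
  have : PySem.Dict.empty.items = ([] : List (Int × Int)) := rfl
  rw [this, List.nil_append]
  simp

-- ===== VERDICT (by name: the statement is the Claim_ definition above) =====
theorem get_repeated_chars_py_spec : Claim_equal_get_repeated_chars_py := by
  intro inputs _
  unfold Spec_get_repeated_chars_py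
  simp only [get_repeated_chars_py, get_repeated_chars_py_alt]
  have hA := pvA_fold inputs [] PySem.Dict.empty PySem.Dict.empty
    (by intro x; simp) (by simp)
  simp only [List.length_nil, Nat.cast_zero] at hA
  rw [hA, pvB_pairs inputs,
    PySem.List.sorted_eq_of_perm_of_pairwise_lt _ _ _ (pvPairs_perm inputs).symm
      (pvEmit_bounds inputs []).2,
    pvDict_ofList_emit]
  rfl
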